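-- pv_equiv track=rewrite | github.com/yeongkyo1997/Algorithm | 백준/Diamond/1557. 제곱 ㄴㄴ/제곱 ㄴㄴ.py | find
-- ===== SOURCE A (Python) =====
-- import math
--
-- def calc_mobius(n):
--     mobius = [1] * (n + 1)
--     is_prime = [True] * (n + 1)
--     for p in range(2, n + 1):
--         if is_prime[p]:
--             for multiple in range(p, n + 1, p):
--                 is_prime[multiple] = False
--                 mobius[multiple] *= -1
--             p_sq = p * p
--             for multiple in range(p_sq, n + 1, p_sq):
--                 mobius[multiple] = 0
--     return mobius
--
-- def cnt_no_square(n, mobius):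
--     limit = int(math.isqrt(n))
--     ret = 0
--     for d in range(1, limit + 1):
--         ret += mobius[d] * (n // (d * d))
--     return ret
--
-- def find(k):
--     low = 1
--     high = 2 * k
--
--     while low < high:
--         mid = (low + high) // 2
--         mobius = calc_mobius(int(math.isqrt(mid)) + 1)
--         cnt = cnt_no_square(mid, mobius)
--         if cnt < k:
--             low = mid + 1
--         else:
--             high = mid
--     return low
-- ===== SOURCE B (Python) =====
-- import math
--
-- def _mu(d):
--     # Moebius value of d by trial-division factorization.
--     r = 1
--     x = d
--     p = 2
--     while p * p <= x:
--         if x % p == 0: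
--             x //= p
--             if x % p == 0:
--                 return 0
--             r = -r
--         p += 1
--     if x > 1:
--         r = -r
--     return r
--
-- def find(k):
--     low = 1
--     high = 2 * k
--     # one Moebius table for the whole binary search
--     mu = [0] + [_mu(d) for d in range(1, math.isqrt(high) + 1)] if low < high else []
--     while low < high:
--         mid = (low + high) // 2
--         cnt = 0
--         for d in range(1, math.isqrt(mid) + 1):
--             cnt += mu[d] * (mid // (d * d))
--         if cnt < k:
--             low = mid + 1
--         else:
--             high = mid
--     return low
-- ===== Notes on version B (the rewrite author's own statement) =====
-- stated objective: faster
-- what changed: B computes one Moebius table up front (per-number trial-division factorization, a different algorithm from A's sign-flipping Eratosthenes sieve) and reuses it for every binary-search step, instead of rebuilding the sieve inside the loop at each step.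
import Mathlib
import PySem

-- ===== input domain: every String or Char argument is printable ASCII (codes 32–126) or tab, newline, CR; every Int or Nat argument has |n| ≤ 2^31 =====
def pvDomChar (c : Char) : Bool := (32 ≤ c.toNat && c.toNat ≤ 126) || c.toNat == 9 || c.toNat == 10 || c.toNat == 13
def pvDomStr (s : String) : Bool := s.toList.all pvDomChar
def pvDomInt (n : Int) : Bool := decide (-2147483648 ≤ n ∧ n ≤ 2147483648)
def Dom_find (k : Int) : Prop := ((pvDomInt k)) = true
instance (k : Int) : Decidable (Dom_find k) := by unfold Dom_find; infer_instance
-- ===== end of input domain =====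

-- B hoists the Moebius computation out of the binary search: one table, filled by
-- per-number trial-division factorization, replaces A's per-step sign-flipping sieve
-- (measurably faster at large k by a constant factor).

-- ===== PORT A =====
-- math.isqrt n, exact for n ≥ 0 (both programs only apply it to positive arguments)
def isqrtI (n : Int) : Int := (Nat.sqrt n.toNat : Int)

def calcMobius (n : Int) : List Int :=
  let mobius := List.replicate (n + 1).toNat (1 : Int)
  let isPrime := List.replicate (n + 1).toNat true
  let st := (PySem.List.pyRange 2 (n + 1) 1).foldl (fun st p =>
    if PySem.List.pyGetD st.2 p true then
      let st1 := (PySem.List.pyRange p (n + 1) p).foldl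
        (fun s m => (PySem.List.pySetD s.1 m (PySem.List.pyGetD s.1 m 0 * (-1)),
                     PySem.List.pySetD s.2 m false)) st
      let pSq := p * p
      let mob2 := (PySem.List.pyRange pSq (n + 1) pSq).foldl
        (fun mb m => PySem.List.pySetD mb m 0) st1.1
      (mob2, st1.2)
    else st) (mobius, isPrime)
  st.1

def cntNoSquare (n : Int) (mobius : List Int) : Int :=
  let limit := isqrtI n
  (PySem.List.pyRange 1 (limit + 1) 1).foldl
    (fun ret d => ret + PySem.List.pyGetD mobius d 0 * PySem.Int.floordiv n (d * d)) 0

-- the while loop, ported with a fuel parameter; high - low shrinks by at least 1 per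
-- iteration, so fuel (2*k).toNat ≥ high - low is never exhausted
def findLoop (k : Int) : Nat → Int → Int → Int
  | 0, low, _ => low
  | fuel + 1, low, high =>
    if low < high then
      let mid := PySem.Int.floordiv (low + high) 2
      let mobius := calcMobius (isqrtI mid + 1)
      let cnt := cntNoSquare mid mobius
      if cnt < k then findLoop k fuel (mid + 1) high else findLoop k fuel low mid
    else low

def find (k : Int) : Int := findLoop k (2 * k).toNat 1 (2 * k)

-- ===== PORT B =====
-- the trial-division loop, ported with a fuel parameter; x + 1 - p shrinks by at
-- least 1 per iteration, so fuel (d + 1).toNat is never exhausted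
def muAux : Nat → Int → Int → Int → Int
  | 0, _, _, r => r
  | fuel + 1, x, p, r =>
    if p * p ≤ x then
      if PySem.Int.mod x p = 0 then
        let x' := PySem.Int.floordiv x p
        if PySem.Int.mod x' p = 0 then 0 else muAux fuel x' (p + 1) (-r)
      else muAux fuel x (p + 1) r
    else if 1 < x then -r else r

def mu (d : Int) : Int := muAux (d + 1).toNat d 2 1

def findAltLoop (k : Int) (muT : List Int) : Nat → Int → Int → Int
  | 0, low, _ => low
  | fuel + 1, low, high =>
    if low < high then
      let mid := PySem.Int.floordiv (low + high) 2
      let cnt := (PySem.List.pyRange 1 (isqrtI mid + 1) 1).foldl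
        (fun c d => c + PySem.List.pyGetD muT d 0 * PySem.Int.floordiv mid (d * d)) 0
      if cnt < k then findAltLoop k muT fuel (mid + 1) high
      else findAltLoop k muT fuel low mid
    else low

def find_alt (k : Int) : Int :=
  let low : Int := 1
  let high := 2 * k
  let muT := if low < high then
      [(0 : Int)] ++ (PySem.List.pyRange 1 (isqrtI high + 1) 1).map mu
    else []
  findAltLoop k muT (2 * k).toNat low high

-- ===== PRECONDITION & SPEC =====
def Spec_find (k : Int) (out : Int) : Prop := out = find_alt k
instance (k : Int) (out : Int) : Decidable (Spec_find k out) := by unfold Spec_find; infer_instance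

-- ===== CLAIM (what is proved, stated in full; the proofs are below) =====
def Claim_equal_find : Prop := ∀ (k : Int), Dom_find k → Spec_find k (find k)

-- ===== LEMMAS AND PROOFS =====

-- reference Moebius function
def muRef (d : Nat) : Int := if Squarefree d then (-1) ^ d.primeFactors.card else 0

lemma muAux_dec1 {x p : Int} (h : p * p ≤ x) (hm : PySem.Int.mod x p = 0) :
    (PySem.Int.floordiv x p + 1 - (p + 1)).toNat < (x + 1 - p).toNat := by
  have hx0 : (0 : Int) ≤ x := le_trans (mul_self_nonneg p) h
  have hpx : p ≤ x := by nlinarith [mul_self_nonneg p]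
  have hexact := PySem.Int.floordiv_mul_add_mod x p
  rw [hm] at hexact
  rcases lt_trichotomy p 0 with hp | hp | hp
  · -- p < 0 and p ∣ x exactly: quotient ≤ 0
    have : PySem.Int.floordiv x p ≤ 0 := by nlinarith
    omega
  · subst hp; simp at hexact; subst hexact; norm_num [PySem.Int.floordiv]
  · have : PySem.Int.floordiv x p = x / p := PySem.Int.floordiv_eq_ediv_of_pos hp
    have := Int.ediv_le_self p hx0
    omega

lemma muAux_dec2 {x p : Int} (h : p * p ≤ x) :
    (x + 1 - (p + 1)).toNat < (x + 1 - p).toNat := by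
  have hpx : p ≤ x := by nlinarith [mul_self_nonneg p]
  omega


-- ---------- generic pointwise-update fold (PIECE 1) ----------
lemma foldl_set_length {α : Type} (f : α → α) (d : α) (l : List Int) :
    ∀ (xs : List α),
    (l.foldl (fun s m => PySem.List.pySetD s m (f (PySem.List.pyGetD s m d))) xs).length
      = xs.length := by
  induction l with
  | nil => intro xs; rfl
  | cons a t ih =>
      intro xs
      simp only [List.foldl_cons]
      rw [ih]
      exact PySem.List.length_pySetD _ _ _

lemma foldl_set_pointwise {α : Type} (f : α → α) (d : α) :
    ∀ (l : List Int) (xs : List α), l.Nodup →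
    (∀ m ∈ l, 0 ≤ m ∧ m < (xs.length : Int)) →
    ∀ (i : Nat),
    (l.foldl (fun s m => PySem.List.pySetD s m (f (PySem.List.pyGetD s m d))) xs).getD i d
      = if (i : Int) ∈ l then f (xs.getD i d) else xs.getD i d := by
  intro l
  induction l with
  | nil => intro xs _ _ i; simp
  | cons a t ih =>
      intro xs hnd hb i
      obtain ⟨ha0, hal⟩ := hb a (by simp)
      have haeq : a = ((a.toNat : Nat) : Int) := by omega
      have hset : PySem.List.pySetD xs a (f (PySem.List.pyGetD xs a d))
          = xs.set a.toNat (f (xs.getD a.toNat d)) := by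
        rw [PySem.List.pySetD_of_nonneg _ _ ha0, PySem.List.pyGetD_of_nonneg _ _ ha0]
      simp only [List.foldl_cons, hset]
      have hlen : (xs.set a.toNat (f (xs.getD a.toNat d))).length = xs.length := by simp
      rw [ih _ (List.Nodup.of_cons hnd)
        (by intro m hm; have := hb m (by simp [hm]); omega) i]
      have hna : a ∉ t := (List.nodup_cons.mp hnd).1
      by_cases hia : (i : Int) = a
      · have hi : i = a.toNat := by omega
        subst hi
        have hnotin : ((a.toNat : Nat) : Int) ∉ t := by rw [← haeq]; exact hna
        rw [if_neg hnotin, if_pos (by rw [← haeq]; exact List.mem_cons_self)]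
        have hlt : a.toNat < xs.length := by omega
        rw [List.getD_eq_getElem?_getD, List.getElem?_set]
        simp [hlt, List.getD_eq_getElem?_getD]
      · have hset_get : (xs.set a.toNat (f (xs.getD a.toNat d))).getD i d = xs.getD i d := by
          rw [List.getD_eq_getElem?_getD, List.getElem?_set]
          have : a.toNat ≠ i := by omega
          simp [this, List.getD_eq_getElem?_getD]
        rw [hset_get]
        by_cases hit : (i : Int) ∈ t
        · simp [hit]
        · simp [hit, List.mem_cons, hia]

lemma nodup_pyRange_of_pos (a b s : Int) (hs : 0 < s) :
    (PySem.List.pyRange a b s).Nodup := by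
  rw [PySem.List.pyRange_of_pos a b hs]
  refine List.Nodup.map ?_ List.nodup_range
  intro i j hij
  have h1 : s * (i : Int) = s * (j : Int) := by
    simpa using hij
  have h2 : (i : Int) = j := mul_left_cancel₀ (by omega : (s : Int) ≠ 0) h1
  exact_mod_cast h2

-- ---------- sieve model (PIECE 2) ----------
def flippedCount (t i : Nat) : Nat :=
  ((Finset.range (t + 1)).filter (fun q => Nat.Prime q ∧ q ∣ i)).card

def sqCount (t i : Nat) : Nat :=
  ((Finset.range (t + 1)).filter (fun q => Nat.Prime q ∧ q * q ∣ i)).card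

def mobModel (t i : Nat) : Int :=
  if sqCount t i = 0 then (-1) ^ flippedCount t i else 0

def SieveInv (N t : Nat) (st : List Int × List Bool) : Prop :=
  st.1.length = N + 1 ∧ st.2.length = N + 1 ∧
  (∀ i : Nat, 1 ≤ i → i ≤ N → st.1.getD i 0 = mobModel t i) ∧
  (∀ i : Nat, 2 ≤ i → i ≤ N →
    (st.2.getD i true = false ↔ ∃ q, q ≤ t ∧ Nat.Prime q ∧ q ∣ i))

def sieveStep (nI : Int) (st : List Int × List Bool) (p : Int) : List Int × List Bool :=
  if PySem.List.pyGetD st.2 p true then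
    let st1 := (PySem.List.pyRange p (nI + 1) p).foldl
      (fun s m => (PySem.List.pySetD s.1 m (PySem.List.pyGetD s.1 m 0 * (-1)),
                   PySem.List.pySetD s.2 m false)) st
    let pSq := p * p
    let mob2 := (PySem.List.pyRange pSq (nI + 1) pSq).foldl
      (fun mb m => PySem.List.pySetD mb m 0) st1.1
    (mob2, st1.2)
  else st

lemma calcMobius_eq_fold (n : Int) :
    calcMobius n = ((PySem.List.pyRange 2 (n + 1) 1).foldl (sieveStep n)
      (List.replicate (n + 1).toNat (1 : Int), List.replicate (n + 1).toNat true)).1 := rfl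

lemma flippedCount_succ (t i : Nat) :
    flippedCount (t + 1) i =
      if Nat.Prime (t + 1) ∧ (t + 1) ∣ i then flippedCount t i + 1 else flippedCount t i := by
  unfold flippedCount
  rw [Finset.range_add_one, Finset.filter_insert]
  split_ifs with h
  · rw [Finset.card_insert_of_notMem (by simp)]
  · rfl

lemma sqCount_succ (t i : Nat) :
    sqCount (t + 1) i =
      if Nat.Prime (t + 1) ∧ (t + 1) * (t + 1) ∣ i then sqCount t i + 1 else sqCount t i := by
  unfold sqCount
  rw [Finset.range_add_one, Finset.filter_insert]
  split_ifs with h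
  · rw [Finset.card_insert_of_notMem (by simp)]
  · rfl

lemma sqCount_zero_iff (t i : Nat) :
    sqCount t i = 0 ↔ ∀ q, q ≤ t → Nat.Prime q → ¬ q * q ∣ i := by
  unfold sqCount
  rw [Finset.card_eq_zero, Finset.filter_eq_empty_iff]
  constructor
  · intro h q hq hp hd
    exact h (Finset.mem_range.mpr (by omega)) ⟨hp, hd⟩
  · intro h q hq ⟨hp, hd⟩
    exact h q (by simpa using Nat.lt_succ_iff.mp (Finset.mem_range.mp hq)) hp hd

lemma prime_of_no_small_divisor (p : Nat) (hp : 2 ≤ p)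
    (h : ∀ q, q ≤ p - 1 → Nat.Prime q → ¬ q ∣ p) : Nat.Prime p := by
  have hq := Nat.minFac_prime (by omega : p ≠ 1)
  have hd := Nat.minFac_dvd p
  have hle := Nat.minFac_le (by omega : 0 < p)
  by_cases he : p.minFac = p
  · rw [← he]; exact hq
  · exact absurd hd (h p.minFac (by omega) hq)

-- membership in the inner ranges
lemma mem_flip_range (p N i : Nat) (hp : 1 ≤ p) (hi1 : 1 ≤ i) :
    ((i : Int) ∈ PySem.List.pyRange (p : Int) ((N : Int) + 1) (p : Int)) ↔ (p ∣ i ∧ i ≤ N) := by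
  rw [PySem.List.mem_pyRange_iff_of_pos (by exact_mod_cast hp)]
  constructor
  · rintro ⟨h1, h2, h3⟩
    have hd : (p : Int) ∣ (i : Int) := by
      have h4 : (i : Int) = ((i : Int) - p) + p := by ring
      rw [h4]; exact dvd_add h3 dvd_rfl
    exact ⟨by exact_mod_cast hd, by omega⟩
  · rintro ⟨h1, h2⟩
    have hpi : p ≤ i := Nat.le_of_dvd (by omega) h1
    refine ⟨by exact_mod_cast hpi, by omega, ?_⟩
    have hd : (p : Int) ∣ (i : Int) := by exact_mod_cast h1
    exact dvd_sub hd dvd_rfl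

lemma sieveStep_inv (N t : Nat) (ht : 1 ≤ t) (htN : t + 1 ≤ N) (st : List Int × List Bool)
    (h : SieveInv N t st) : SieveInv N (t + 1) (sieveStep (N : Int) st ((t : Int) + 1)) := by
  obtain ⟨mob, isp⟩ := st
  obtain ⟨hlen1, hlen2, hmob, hisp⟩ := h
  dsimp only at hlen1 hlen2 hmob hisp
  have hcast : ((t : Int) + 1) = (((t + 1 : Nat)) : Int) := by push_cast; ring
  unfold sieveStep
  rw [hcast, PySem.List.pyGetD_natCast]
  by_cases hbp : isp.getD (t + 1) true = true
  · -- t+1 is prime: the sieve processes it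
    have hpp : Nat.Prime (t + 1) := by
      apply prime_of_no_small_divisor (t + 1) (by omega)
      intro q hq hqp hqd
      have hf : isp.getD (t + 1) true = false :=
        (hisp (t + 1) (by omega) htN).mpr ⟨q, by omega, hqp, hqd⟩
      rw [hf] at hbp; exact Bool.false_ne_true hbp
    rw [if_pos hbp]
    have hppos : (0 : Int) < (((t + 1 : Nat)) : Int) := by exact_mod_cast Nat.succ_pos t
    set L1 := PySem.List.pyRange (((t + 1 : Nat)) : Int) ((N : Int) + 1) (((t + 1 : Nat)) : Int)
      with hL1def
    have hnd1 : L1.Nodup := nodup_pyRange_of_pos _ _ _ hppos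
    have hbound1 : ∀ m ∈ L1, 0 ≤ m ∧ m < ((mob.length : Nat) : Int) := by
      intro m hm
      obtain ⟨hm1, hm2, _⟩ := (PySem.List.mem_pyRange_iff_of_pos hppos m).mp hm
      rw [hlen1]; push_cast; omega
    have hbound1' : ∀ m ∈ L1, 0 ≤ m ∧ m < ((isp.length : Nat) : Int) := by
      intro m hm; have := hbound1 m hm; rw [hlen1] at this; rw [hlen2]; exact this
    rw [PySem.List.foldl_prod_mk
      (fun s m => PySem.List.pySetD s m (PySem.List.pyGetD s m 0 * (-1)))
      (fun s m => PySem.List.pySetD s m false) L1 mob isp]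
    dsimp only
    have hsq_cast : (((t + 1 : Nat)) : Int) * (((t + 1 : Nat)) : Int)
        = ((((t + 1) * (t + 1) : Nat)) : Int) := by push_cast; ring
    rw [hsq_cast]
    set mob1 := L1.foldl
      (fun s m => PySem.List.pySetD s m (PySem.List.pyGetD s m 0 * (-1))) mob with hmob1def
    set isp1 := L1.foldl (fun s m => PySem.List.pySetD s m false) isp with hisp1def
    set L2 := PySem.List.pyRange ((((t + 1) * (t + 1) : Nat)) : Int) ((N : Int) + 1)
      ((((t + 1) * (t + 1) : Nat)) : Int) with hL2def
    have hp2pos : (0 : Int) < ((((t + 1) * (t + 1) : Nat)) : Int) := by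
      have : 0 < (t + 1) * (t + 1) := Nat.mul_pos (Nat.succ_pos t) (Nat.succ_pos t)
      exact_mod_cast this
    have hnd2 : L2.Nodup := nodup_pyRange_of_pos _ _ _ hp2pos
    have hlen_mob1 : mob1.length = mob.length :=
      foldl_set_length (fun v => v * (-1)) 0 L1 mob
    have hlen_isp1 : isp1.length = isp.length :=
      foldl_set_length (fun _ => false) true L1 isp
    have hbound2 : ∀ m ∈ L2, 0 ≤ m ∧ m < ((mob1.length : Nat) : Int) := by
      intro m hm
      obtain ⟨hm1, hm2, _⟩ := (PySem.List.mem_pyRange_iff_of_pos hp2pos m).mp hm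
      rw [hlen_mob1, hlen1]; push_cast; omega
    have hmob1get : ∀ i : Nat, mob1.getD i 0
        = if ((i : Nat) : Int) ∈ L1 then mob.getD i 0 * (-1) else mob.getD i 0 :=
      fun i => foldl_set_pointwise (fun v => v * (-1)) 0 L1 mob hnd1 hbound1 i
    have hisp1get : ∀ i : Nat, isp1.getD i true
        = if ((i : Nat) : Int) ∈ L1 then false else isp.getD i true :=
      fun i => foldl_set_pointwise (fun _ => false) true L1 isp hnd1 hbound1' i
    set mob2 := L2.foldl (fun mb m => PySem.List.pySetD mb m 0) mob1 with hmob2def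
    have hmob2get : ∀ i : Nat, mob2.getD i 0
        = if ((i : Nat) : Int) ∈ L2 then 0 else mob1.getD i 0 :=
      fun i => foldl_set_pointwise (fun _ => (0 : Int)) 0 L2 mob1 hnd2 hbound2 i
    have hlen_mob2 : mob2.length = mob1.length :=
      foldl_set_length (fun _ => (0 : Int)) 0 L2 mob1
    have hmemL1 : ∀ i : Nat, 1 ≤ i →
        (((i : Nat) : Int) ∈ L1 ↔ ((t + 1) ∣ i ∧ i ≤ N)) := by
      intro i hi1
      exact mem_flip_range (t + 1) N i (by omega) hi1
    have hmemL2 : ∀ i : Nat, 1 ≤ i →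
        (((i : Nat) : Int) ∈ L2 ↔ ((t + 1) * (t + 1) ∣ i ∧ i ≤ N)) := by
      intro i hi1
      exact mem_flip_range ((t + 1) * (t + 1)) N i (Nat.mul_pos (by omega) (by omega)) hi1
    unfold SieveInv
    refine ⟨?_, ?_, ?_, ?_⟩
    · dsimp only; rw [hlen_mob2, hlen_mob1, hlen1]
    · dsimp only; rw [hlen_isp1, hlen2]
    · dsimp only
      intro i hi1 hiN
      rw [hmob2get i, hmob1get i, hmob i hi1 hiN]
      unfold mobModel
      rw [flippedCount_succ, sqCount_succ]
      by_cases hsq : (t + 1) * (t + 1) ∣ i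
      · have hm2 : ((i : Nat) : Int) ∈ L2 := (hmemL2 i hi1).mpr ⟨hsq, hiN⟩
        have hcsq : Nat.Prime (t + 1) ∧ (t + 1) * (t + 1) ∣ i := ⟨hpp, hsq⟩
        rw [if_pos hm2, if_pos hcsq, if_neg (by omega : ¬ (sqCount t i + 1 = 0))]
      · have hm2 : ¬ ((i : Nat) : Int) ∈ L2 := fun hc => hsq ((hmemL2 i hi1).mp hc).1
        have hcsq : ¬ (Nat.Prime (t + 1) ∧ (t + 1) * (t + 1) ∣ i) := fun hc => hsq hc.2
        rw [if_neg hm2, if_neg hcsq]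
        by_cases hdv : (t + 1) ∣ i
        · have hm1 : ((i : Nat) : Int) ∈ L1 := (hmemL1 i hi1).mpr ⟨hdv, hiN⟩
          have hcdv : Nat.Prime (t + 1) ∧ (t + 1) ∣ i := ⟨hpp, hdv⟩
          rw [if_pos hm1, if_pos hcdv]
          by_cases hz : sqCount t i = 0
          · rw [if_pos hz, if_pos hz, pow_succ]
          · rw [if_neg hz, if_neg hz]; ring
        · have hm1 : ¬ ((i : Nat) : Int) ∈ L1 := fun hc => hdv ((hmemL1 i hi1).mp hc).1
          have hcdv : ¬ (Nat.Prime (t + 1) ∧ (t + 1) ∣ i) := fun hc => hdv hc.2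
          rw [if_neg hm1, if_neg hcdv]
    · dsimp only
      intro i hi2 hiN
      rw [hisp1get i]
      by_cases hdv : (t + 1) ∣ i
      · rw [if_pos ((hmemL1 i (by omega)).mpr ⟨hdv, hiN⟩)]
        simp only [true_iff]
        exact ⟨t + 1, le_refl _, hpp, hdv⟩
      · have hm1 : ¬ ((i : Nat) : Int) ∈ L1 := fun hc => hdv ((hmemL1 i (by omega)).mp hc).1
        rw [if_neg hm1, hisp i hi2 hiN]
        constructor
        · rintro ⟨q, hq, hqp, hqd⟩; exact ⟨q, by omega, hqp, hqd⟩
        · rintro ⟨q, hq, hqp, hqd⟩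
          refine ⟨q, ?_, hqp, hqd⟩
          rcases Nat.lt_or_ge q (t + 1) with hlt | hge
          · omega
          · exfalso; have : q = t + 1 := by omega
            subst this; exact hdv hqd
  · -- t+1 is composite: the sieve skips it
    have hfalse : isp.getD (t + 1) true = false := by
      cases hh : isp.getD (t + 1) true
      · rfl
      · exact absurd hh hbp
    obtain ⟨q, hq, hqp, hqd⟩ := (hisp (t + 1) (by omega) htN).mp hfalse
    have hnp : ¬ Nat.Prime (t + 1) := by
      intro hp
      rcases (Nat.Prime.eq_one_or_self_of_dvd hp q hqd) with h1 | h1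
      · exact Nat.Prime.one_lt hqp |>.ne' h1
      · omega
    rw [if_neg hbp]
    refine ⟨hlen1, hlen2, ?_, ?_⟩
    · intro i hi1 hiN
      rw [hmob i hi1 hiN]
      unfold mobModel
      have hc1 : ¬ (Nat.Prime (t + 1) ∧ (t + 1) ∣ i) := fun hc => hnp hc.1
      have hc2 : ¬ (Nat.Prime (t + 1) ∧ (t + 1) * (t + 1) ∣ i) := fun hc => hnp hc.1
      rw [flippedCount_succ, sqCount_succ, if_neg hc1, if_neg hc2]
    · intro i hi2 hiN
      rw [hisp i hi2 hiN]
      constructor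
      · rintro ⟨q', hq', hqp', hqd'⟩; exact ⟨q', by omega, hqp', hqd'⟩
      · rintro ⟨q', hq', hqp', hqd'⟩
        refine ⟨q', ?_, hqp', hqd'⟩
        rcases Nat.lt_or_ge q' (t + 1) with hlt | hge
        · omega
        · exfalso; have : q' = t + 1 := by omega
          subst this; exact hnp hqp'

lemma no_prime_le_one (q : Nat) (hq : q ≤ 1) : ¬ Nat.Prime q := by
  intro hp; have := hp.two_le; omega

lemma sieve_inv_all (N : Nat) (hN : 1 ≤ N) : ∀ t : Nat, 1 ≤ t → t ≤ N →
    SieveInv N t ((PySem.List.pyRange 2 ((t : Int) + 1) 1).foldl (sieveStep (N : Int))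
      (List.replicate (N + 1) (1 : Int), List.replicate (N + 1) true)) := by
  intro t ht
  induction t, ht using Nat.le_induction with
  | base =>
    intro _
    rw [PySem.List.pyRange_one_eq_nil (by norm_num)]
    refine ⟨by simp, by simp, ?_, ?_⟩
    · intro i hi1 hiN
      have hlt : i < N + 1 := by omega
      show (List.replicate (N + 1) (1 : Int)).getD i 0 = mobModel 1 i
      rw [List.getD_replicate _ hlt]
      unfold mobModel
      have hfc : flippedCount 1 i = 0 := by
        unfold flippedCount
        rw [Finset.card_eq_zero, Finset.filter_eq_empty_iff]
        intro q hq
        rintro ⟨hqp, -⟩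
        exact no_prime_le_one q (by simpa using Nat.lt_succ_iff.mp (Finset.mem_range.mp hq)) hqp
      have hsc : sqCount 1 i = 0 := by
        rw [sqCount_zero_iff]
        intro q hq hqp
        exact absurd hqp (no_prime_le_one q hq)
      rw [hsc, hfc]; simp
    · intro i hi2 hiN
      have hlt : i < N + 1 := by omega
      show (List.replicate (N + 1) true).getD i true = false ↔ ∃ q ≤ 1, Nat.Prime q ∧ q ∣ i
      rw [List.getD_replicate _ hlt]
      constructor
      · intro h; exact absurd h (by simp)
      · rintro ⟨q, hq, hqp, -⟩
        exact absurd hqp (no_prime_le_one q hq)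
  | succ t ht ih =>
    intro htN
    have hprev := ih (by omega)
    have hsplit : PySem.List.pyRange 2 ((((t + 1) : Nat) : Int) + 1) 1
        = PySem.List.pyRange 2 ((t : Int) + 1) 1 ++ [(t : Int) + 1] := by
      have h1 : (((t + 1) : Nat) : Int) + 1 = ((t : Int) + 1) + 1 := by push_cast; ring
      rw [h1, PySem.List.pyRange_one_succ_right (by omega)]
    rw [hsplit, List.foldl_append]
    simpa using sieveStep_inv N t ht htN _ hprev

lemma mobModel_eq_muRef (N d : Nat) (hd1 : 1 ≤ d) (hdN : d ≤ N) :
    mobModel N d = muRef d := by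
  unfold mobModel muRef
  have hsq : sqCount N d = 0 ↔ Squarefree d := by
    rw [sqCount_zero_iff, Nat.squarefree_iff_prime_squarefree]
    constructor
    · intro h q hqp hd
      have hqd : q ≤ d := le_trans (Nat.le_of_dvd (by omega) hd |>.trans' (Nat.le_mul_of_pos_left q hqp.pos)) (le_refl d)
      exact h q (by omega) hqp hd
    · intro h q _ hqp hd
      exact h q hqp hd
  have hfc : flippedCount N d = d.primeFactors.card := by
    unfold flippedCount
    congr 1
    ext q
    simp only [Finset.mem_filter, Finset.mem_range, Nat.mem_primeFactors]
    constructor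
    · rintro ⟨-, hqp, hqd⟩; exact ⟨hqp, hqd, by omega⟩
    · rintro ⟨hqp, hqd, -⟩
      exact ⟨by have := Nat.le_of_dvd (by omega) hqd; omega, hqp, hqd⟩
  rw [hfc]
  by_cases h : Squarefree d
  · rw [if_pos (hsq.mpr h), if_pos h]
  · rw [if_neg (fun hc => h (hsq.mp hc)), if_neg h]

lemma calcMobius_getD (N : Nat) (hN : 1 ≤ N) (d : Nat) (hd1 : 1 ≤ d) (hdN : d ≤ N) :
    (calcMobius (N : Int)).getD d 0 = muRef d := by
  rw [calcMobius_eq_fold]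
  have h1 : ((N : Int) + 1).toNat = N + 1 := by omega
  rw [h1]
  have hinv := sieve_inv_all N hN N hN (le_refl N)
  exact (hinv.2.2.1 d hd1 hdN).trans (mobModel_eq_muRef N d hd1 hdN)

-- ---------- trial division (PIECE 3) ----------
lemma muRef_prime_mul (P m : Nat) (hP : Nat.Prime P) (hnd : ¬ P ∣ m) (hm : 1 ≤ m) :
    muRef (P * m) = -muRef m := by
  have hco : Nat.Coprime P m := (Nat.Prime.coprime_iff_not_dvd hP).mpr hnd
  unfold muRef
  by_cases hsm : Squarefree m
  · have hs : Squarefree (P * m) := (Nat.squarefree_mul hco).mpr ⟨hP.squarefree, hsm⟩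
    rw [if_pos hs, if_pos hsm]
    rw [Nat.primeFactors_mul hP.ne_zero (by omega : m ≠ 0), hP.primeFactors,
      Finset.singleton_union]
    have hPnot : P ∉ m.primeFactors := fun hc => hnd (Nat.dvd_of_mem_primeFactors hc)
    rw [Finset.card_insert_of_notMem hPnot, pow_succ]
    ring
  · have hns : ¬ Squarefree (P * m) := fun hc => hsm ((Nat.squarefree_mul hco).mp hc).2
    rw [if_neg hns, if_neg hsm]; ring

lemma int_nat_dvd (a b : Int) (ha : 0 ≤ a) (hb : 0 ≤ b) :
    a ∣ b ↔ a.toNat ∣ b.toNat := by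
  constructor
  · intro h
    have h1 : ((a.toNat : Int)) ∣ ((b.toNat : Int)) := by
      rwa [Int.toNat_of_nonneg ha, Int.toNat_of_nonneg hb]
    exact_mod_cast h1
  · intro h
    have h1 : ((a.toNat : Int)) ∣ ((b.toNat : Int)) := by exact_mod_cast h
    rwa [Int.toNat_of_nonneg ha, Int.toNat_of_nonneg hb] at h1

lemma muAux_eq : ∀ (fuel : Nat) (x p r : Int), (x + 1 - p).toNat < fuel → 2 ≤ p → 1 ≤ x →
    (∀ q : Nat, Nat.Prime q → ((q : Int)) ∣ x → p ≤ (q : Int)) →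
    muAux fuel x p r = r * muRef x.toNat := by
  intro fuel
  induction fuel with
  | zero => intro x p r hf; exact absurd hf (Nat.not_lt_zero _)
  | succ n ih =>
    intro x p r hn h2 h1 hmin
    simp only [muAux]
    by_cases hle : p * p ≤ x
    · rw [if_pos hle]
      by_cases hm : PySem.Int.mod x p = 0
      · rw [if_pos hm]
        have hdvd : p ∣ x := (PySem.Int.mod_eq_zero_iff_dvd x p).mp hm
        have hpdiv : PySem.Int.floordiv x p * p = x := by
          have := PySem.Int.floordiv_mul_add_mod x p
          rw [hm] at this; linarith
        set x' := PySem.Int.floordiv x p with hx'def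
        have hx'1 : 1 ≤ x' := by nlinarith
        -- p is the least prime factor of x, hence prime
        have hPd : p.toNat ∣ x.toNat := (int_nat_dvd p x (by omega) (by omega)).mp hdvd
        have hx2 : 2 ≤ x.toNat := by
          have := Int.le_of_dvd (by omega) hdvd; omega
        have hPp : Nat.Prime p.toNat := by
          have hq0 : Nat.Prime p.toNat.minFac := Nat.minFac_prime (by omega : p.toNat ≠ 1)
          have hq0d : p.toNat.minFac ∣ p.toNat := Nat.minFac_dvd p.toNat
          have hq0x : ((p.toNat.minFac : Int)) ∣ x := by
            have hnn : p.toNat.minFac ∣ x.toNat := hq0d.trans hPd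
            have h1 := (int_nat_dvd (p.toNat.minFac : Int) x (by positivity) (by omega)).mpr
              (by simpa using hnn)
            exact h1
          have hple : p ≤ (p.toNat.minFac : Int) := hmin p.toNat.minFac hq0 hq0x
          have hle' : p.toNat.minFac ≤ p.toNat := Nat.minFac_le (by omega)
          have heq : p.toNat.minFac = p.toNat := by omega
          rw [← heq]; exact hq0
        by_cases hm2 : PySem.Int.mod x' p = 0
        · rw [if_pos hm2]
          have hdvd2 : p ∣ x' := (PySem.Int.mod_eq_zero_iff_dvd x' p).mp hm2
          have hsqdvd : p * p ∣ x := by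
            obtain ⟨c, hc⟩ := hdvd2
            exact ⟨c, by rw [← hpdiv, hc]; ring⟩
          have hsqN : p.toNat * p.toNat ∣ x.toNat := by
            have hcast : ((p.toNat * p.toNat : Nat) : Int) = p * p := by
              push_cast
              rw [Int.toNat_of_nonneg (by omega : (0:Int) ≤ p)]
            have h1 : ((p.toNat * p.toNat : Nat) : Int) ∣ x := by rw [hcast]; exact hsqdvd
            have h2' := (int_nat_dvd _ x (by positivity) (by omega)).mp h1
            rwa [Int.toNat_natCast] at h2'
          have hns : ¬ Squarefree x.toNat :=
            fun hs => (Nat.squarefree_iff_prime_squarefree.mp hs p.toNat hPp) hsqN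
          unfold muRef
          rw [if_neg hns]; ring
        · rw [if_neg hm2]
          have hnd2 : ¬ p ∣ x' := fun hc => hm2 ((PySem.Int.mod_eq_zero_iff_dvd x' p).mpr hc)
          have hlt : (x' + 1 - (p + 1)).toNat < n := by
            have := muAux_dec1 hle hm; omega
          have hcond : ∀ q : Nat, Nat.Prime q → ((q : Int)) ∣ x' → p + 1 ≤ (q : Int) := by
            intro q hqp hqd
            have hqx : ((q : Int)) ∣ x := hqd.trans ⟨p, hpdiv.symm⟩
            have := hmin q hqp hqx
            rcases lt_or_ge p (q : Int) with hc | hc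
            · omega
            · exfalso
              have heq : (q : Int) = p := by omega
              rw [heq] at hqd; exact hnd2 hqd
          rw [ih x' (p + 1) (-r) hlt (by omega) hx'1 hcond]
          have hxt : x.toNat = p.toNat * x'.toNat := by
            have hcast : ((p.toNat * x'.toNat : Nat) : Int) = x := by
              push_cast
              rw [Int.toNat_of_nonneg (by omega : (0:Int) ≤ p),
                  Int.toNat_of_nonneg (by omega : (0:Int) ≤ x')]
              linarith [hpdiv]
            omega
          have hndN : ¬ p.toNat ∣ x'.toNat := by
            intro hc
            exact hnd2 ((int_nat_dvd p x' (by omega) (by omega)).mpr hc)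
          rw [hxt, muRef_prime_mul p.toNat x'.toNat hPp hndN (by omega)]
          ring
      · rw [if_neg hm]
        have hnd : ¬ p ∣ x := fun hc => hm ((PySem.Int.mod_eq_zero_iff_dvd x p).mpr hc)
        have hlt : (x + 1 - (p + 1)).toNat < n := by
          have := muAux_dec2 hle; omega
        apply ih x (p + 1) r hlt (by omega) h1
        intro q hqp hqd
        have hq := hmin q hqp hqd
        rcases lt_or_ge p (q : Int) with hc | hc
        · omega
        · exfalso
          have : (q : Int) = p := by omega
          rw [this] at hqd
          exact hnd hqd
    · rw [if_neg hle]
      by_cases h1x : 1 < x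
      · rw [if_pos h1x]
        have hxp : Nat.Prime x.toNat := by
          set X := x.toNat with hX
          have hX2 : 2 ≤ X := by omega
          have hq0 : Nat.Prime X.minFac := Nat.minFac_prime (by omega)
          have hq0d : X.minFac ∣ X := Nat.minFac_dvd X
          have hq0i : ((X.minFac : Int)) ∣ x := by
            rw [show x = ((X : Nat) : Int) by omega]
            exact_mod_cast hq0d
          have hpq0 : p ≤ (X.minFac : Int) := hmin X.minFac hq0 hq0i
          set m := X / X.minFac with hm
          have hXm : X = X.minFac * m := (Nat.div_mul_cancel hq0d).symm.trans (by ring)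
          by_cases hm1 : m = 1
          · rw [hm1, Nat.mul_one] at hXm
            have hfin : Nat.Prime X := by rw [hXm]; exact hq0
            exact hfin
          · exfalso
            have hm0 : m ≠ 0 := by
              intro hc; rw [hc, Nat.mul_zero] at hXm; omega
            have hq1 : Nat.Prime m.minFac := Nat.minFac_prime hm1
            have hq1d : m.minFac ∣ m := Nat.minFac_dvd m
            have hq1X : m.minFac ∣ X := hq1d.trans (Dvd.intro_left _ hXm.symm)
            have hq1i : ((m.minFac : Int)) ∣ x := by
              rw [show x = ((X : Nat) : Int) by omega]
              exact_mod_cast hq1X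
            have hpq1 : p ≤ (m.minFac : Int) := hmin m.minFac hq1 hq1i
            have hq1m : m.minFac ≤ m := Nat.minFac_le (Nat.pos_of_ne_zero hm0)
            have hXi : ((X : Int)) = ((X.minFac : Int)) * ((m : Int)) := by
              exact_mod_cast hXm
            have hxX : x = ((X : Int)) := by omega
            have hxlt : x < p * p := not_le.mp hle
            have hchain : p * p ≤ ((X.minFac : Int)) * ((m : Int)) :=
              calc p * p ≤ ((X.minFac : Int)) * ((m.minFac : Int)) :=
                    mul_le_mul hpq0 hpq1 (by omega) (by positivity)
                _ ≤ ((X.minFac : Int)) * ((m : Int)) :=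
                    mul_le_mul_of_nonneg_left (by exact_mod_cast hq1m) (by positivity)
            rw [← hXi] at hchain
            linarith
        unfold muRef
        rw [if_pos hxp.squarefree, hxp.primeFactors, Finset.card_singleton, pow_one]
        ring
      · rw [if_neg h1x]
        have hx1 : x = 1 := by omega
        subst hx1
        unfold muRef
        norm_num

lemma mu_eq_muRef (d : Int) (hd : 1 ≤ d) : mu d = muRef d.toNat := by
  have := muAux_eq (d + 1).toNat d 2 1 (by omega) (le_refl 2) hd
    (fun q hq _ => by exact_mod_cast hq.two_le)
  simpa [mu] using this

-- ---------- the table and the loops (PIECE 4) ----------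
def muTab (k : Int) : List Int :=
  [(0 : Int)] ++ (PySem.List.pyRange 1 (isqrtI (2 * k) + 1) 1).map mu

lemma muTab_getD (k : Int) (d : Nat) (hd1 : 1 ≤ d) (hdS : d ≤ Nat.sqrt (2 * k).toNat) :
    (muTab k).getD d 0 = muRef d := by
  unfold muTab isqrtI
  set S := Nat.sqrt (2 * k).toNat with hS
  have hrange : PySem.List.pyRange 1 ((S : Int) + 1) 1
      = (List.range S).map (fun j : Nat => (1 : Int) + (j : Int)) := by
    rw [PySem.List.pyRange_one]
    have h : (((S : Int) + 1) - 1).toNat = S := by omega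
    rw [h]
  obtain ⟨e, rfl⟩ : ∃ e, d = e + 1 := ⟨d - 1, by omega⟩
  rw [hrange]
  simp only [List.singleton_append, List.getD_cons_succ]
  have he : e < S := by omega
  rw [List.getD_eq_getElem?_getD, List.getElem?_map, List.getElem?_map, List.getElem?_range he]
  simp only [Option.map_some, Option.getD_some]
  have hcast : (1 : Int) + (e : Int) = (((e + 1 : Nat)) : Int) := by push_cast; ring
  rw [hcast, mu_eq_muRef _ (by exact_mod_cast Nat.succ_pos e)]
  simp

lemma cnt_eq (k mid : Int) (h1 : 1 ≤ mid) (h2 : mid ≤ 2 * k) :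
    cntNoSquare mid (calcMobius (isqrtI mid + 1)) =
    (PySem.List.pyRange 1 (isqrtI mid + 1) 1).foldl
      (fun c d => c + PySem.List.pyGetD (muTab k) d 0 * PySem.Int.floordiv mid (d * d)) 0 := by
  unfold cntNoSquare
  apply PySem.List.foldl_congr_mem
  intro acc d hd
  obtain ⟨hd1, hd2⟩ := (PySem.List.mem_pyRange_one).mp hd
  have hD : d = ((d.toNat : Nat) : Int) := by omega
  have hdle : d.toNat ≤ Nat.sqrt mid.toNat := by
    unfold isqrtI at hd2; omega
  have hmono : Nat.sqrt mid.toNat ≤ Nat.sqrt (2 * k).toNat := Nat.sqrt_le_sqrt (by omega)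
  have hA : isqrtI mid + 1 = ((Nat.sqrt mid.toNat + 1 : Nat) : Int) := by
    unfold isqrtI; push_cast; ring
  have hkey : PySem.List.pyGetD (calcMobius (isqrtI mid + 1)) d 0
      = PySem.List.pyGetD (muTab k) d 0 := by
    rw [hD, PySem.List.pyGetD_natCast, PySem.List.pyGetD_natCast, hA,
      calcMobius_getD (Nat.sqrt mid.toNat + 1) (by omega) d.toNat (by omega) (by omega),
      muTab_getD k d.toNat (by omega) (by omega)]
  rw [hkey]

lemma loop_eq (k : Int) : ∀ (fuel : Nat) (low high : Int),
    1 ≤ low → high ≤ 2 * k →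
    findLoop k fuel low high = findAltLoop k (muTab k) fuel low high := by
  intro fuel
  induction fuel with
  | zero => intro low high _ _; rfl
  | succ n ih =>
    intro low high hlow hhigh
    simp only [findLoop, findAltLoop]
    by_cases hlh : low < high
    · rw [if_pos hlh, if_pos hlh]
      have hb := PySem.Int.floordiv_two_mid_bounds (le_of_lt hlh)
      have hmidlt : PySem.Int.floordiv (low + high) 2 < high := by
        rw [PySem.Int.floordiv_lt_iff_lt_mul (by omega)]; omega
      have hc := cnt_eq k (PySem.Int.floordiv (low + high) 2) (by omega) (by omega)
      rw [hc]
      split_ifs with hcnt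
      · exact ih _ _ (by omega) hhigh
      · exact ih _ _ hlow (by omega)
    · rw [if_neg hlh, if_neg hlh]

-- ===== VERDICT (by name: the statement is the Claim_ definition above) =====
theorem find_spec : Claim_equal_find := by
  intro k _
  unfold Spec_find find find_alt
  by_cases h : (1 : Int) < 2 * k
  · simp only [if_pos h]
    exact loop_eq k (2 * k).toNat 1 (2 * k) (le_refl 1) (le_refl _)
  · simp only [if_neg h]
    have hf : (2 * k).toNat = 0 := by omega
    rw [hf]
    rfl
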